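-- pv_equiv track=rewrite | github.com/ghawkes1217/Conjectures-and-Computations | qt-catalan/johnson.py | john
-- ===== SOURCE A (Python) =====
-- def john(a,cap):
--     #create the sequences defined on bottom of page 30 (reversed order and with n=0 m=cap
--     #we have reversed order to match more standard area sequence notation in Dyck paths
--     leng=a-1
--     SEQ=[[]]
--     while len(SEQ[0])<leng:
--         newSEQ=[]
--         for curseq in SEQ:
--             last=0
--             top=cap
--             if len(curseq)>0:
--                 last=curseq[-1]
--                 top=min(last+a-1,cap)
--             for j in range(last,top+1):
--                 newSEQ+=[curseq+[j]]
--         SEQ=newSEQ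
--     return(SEQ)
-- ===== SOURCE B (Python) =====
-- def john(a, cap):
--     # Suffix DP: tails[last] = all valid suffixes of the current length that may
--     # follow a value `last`; iterate leng-1 times, then expand the root level.
--     leng = a - 1
--     if leng <= 0:
--         return [[]]
--     tails = [[[]] for _ in range(cap + 1)]
--     for _ in range(leng - 1):
--         tails = [[[j] + t
--                   for j in range(last, min(last + a - 1, cap) + 1)
--                   for t in tails[j]]
--                  for last in range(cap + 1)]
--     return [[j] + t for j in range(cap + 1) for t in tails[j]]
-- ===== Notes on version B (the rewrite author's own statement) =====
-- stated objective: alternative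
-- what changed: Replaces A's level-by-level BFS over all prefixes with a suffix dynamic programme: a table tails[last] of the valid suffixes that may follow each last value is iterated leng-1 times and expanded once at the root, instead of carrying every prefix through every level.
import Mathlib
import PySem

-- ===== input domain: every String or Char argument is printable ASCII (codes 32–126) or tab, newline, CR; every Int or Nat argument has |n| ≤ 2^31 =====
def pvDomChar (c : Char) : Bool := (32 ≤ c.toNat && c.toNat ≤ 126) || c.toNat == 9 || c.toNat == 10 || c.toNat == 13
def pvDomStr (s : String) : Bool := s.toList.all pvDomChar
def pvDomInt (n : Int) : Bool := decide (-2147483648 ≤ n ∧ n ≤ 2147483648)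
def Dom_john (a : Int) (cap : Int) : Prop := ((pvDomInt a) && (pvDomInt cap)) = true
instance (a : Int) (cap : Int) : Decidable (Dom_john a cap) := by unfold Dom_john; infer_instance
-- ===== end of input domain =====

-- B replaces A's level-by-level BFS over prefixes by a suffix DP table indexed by the last value; same output, similar cost.


-- ===== PORT A =====
-- one BFS level step: for curseq in SEQ: … newSEQ += [curseq+[j]]
def johnStep (a : Int) (cap : Int) (SEQ : List (List Int)) : List (List Int) :=
  SEQ.foldl (fun newSEQ curseq =>
    let last : Int := if 0 < curseq.length then PySem.List.pyGetD curseq (-1) 0 else 0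
    let top : Int := if 0 < curseq.length then min (last + a - 1) cap else cap
    newSEQ ++ (PySem.List.pyRange last (top + 1) 1).map (fun j => curseq ++ [j])) []

-- the while loop; fuel (a-1).toNat is exactly the number of iterations Python performs
-- (each iteration raises the common length of the members of SEQ by one)
def johnLoop (a : Int) (cap : Int) : Nat → List (List Int) → List (List Int)
  | 0, SEQ => SEQ
  | fuel + 1, SEQ =>
    if ((SEQ.headD []).length : Int) < a - 1 then
      johnLoop a cap fuel (johnStep a cap SEQ)
    else SEQ

def john (a : Int) (cap : Int) : List (List Int) :=
  johnLoop a cap (a - 1).toNat [[]]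

-- ===== PORT B =====
-- one suffix-DP refinement: tails[last] = [[j]+t for j in range(last, min(last+a-1,cap)+1) for t in tails[j]]
def johnTailsStep (a : Int) (cap : Int) (tails : List (List (List Int))) : List (List (List Int)) :=
  (PySem.List.pyRange 0 (cap + 1) 1).map (fun last =>
    (PySem.List.pyRange last (min (last + a - 1) cap + 1) 1).flatMap (fun j =>
      (PySem.List.pyGetD tails j []).map (fun t => j :: t)))

def john_alt (a : Int) (cap : Int) : List (List Int) :=
  let leng := a - 1
  if leng ≤ 0 then [[]]
  else
    let init : List (List (List Int)) := (PySem.List.pyRange 0 (cap + 1) 1).map (fun _ => [([] : List Int)])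
    let tails := (List.range (leng - 1).toNat).foldl (fun tails _ => johnTailsStep a cap tails) init
    (PySem.List.pyRange 0 (cap + 1) 1).flatMap (fun j =>
      (PySem.List.pyGetD tails j []).map (fun t => j :: t))

-- ===== PRECONDITION & SPEC =====
-- Pre_ excludes exactly the inputs (a ≥ 2 and cap < 0) on which Python A raises IndexError at SEQ[0].
def Pre_john (a : Int) (cap : Int) : Prop := a ≤ 1 ∨ 0 ≤ cap
instance (a : Int) (cap : Int) : Decidable (Pre_john a cap) := by unfold Pre_john; infer_instance
def pvWitness_john : Int × Int := (4, 2)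

def Spec_john (a : Int) (cap : Int) (out : List (List Int)) : Prop := out = john_alt a cap
instance (a : Int) (cap : Int) (out : List (List Int)) : Decidable (Spec_john a cap out) := by unfold Spec_john; infer_instance

-- ===== CLAIM (what is proved, stated in full; the proofs are below) =====
def Claim_equal_john : Prop := ∀ (a : Int) (cap : Int), Dom_john a cap → Pre_john a cap → Spec_john a cap (john a cap)

-- ===== LEMMAS AND PROOFS =====

-- ghost: depth-first expansion of one prefix (children exactly as A computes them)
def extJ (a : Int) (cap : Int) : Nat → List Int → List (List Int)
  | 0, curseq => [curseq]
  | k + 1, curseq =>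
    let last : Int := if 0 < curseq.length then PySem.List.pyGetD curseq (-1) 0 else 0
    let top : Int := if 0 < curseq.length then min (last + a - 1) cap else cap
    (PySem.List.pyRange last (top + 1) 1).flatMap (fun j => extJ a cap k (curseq ++ [j]))

-- ghost: suffixes of length k that may follow a value `last`
def sufJ (a : Int) (cap : Int) : Nat → Int → List (List Int)
  | 0, _ => [[]]
  | k + 1, last =>
    (PySem.List.pyRange last (min (last + a - 1) cap + 1) 1).flatMap (fun j =>
      (sufJ a cap k j).map (fun t => j :: t))

theorem johnStep_eq_flatMap (a cap : Int) (SEQ : List (List Int)) :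
    johnStep a cap SEQ = SEQ.flatMap (fun curseq =>
      let last : Int := if 0 < curseq.length then PySem.List.pyGetD curseq (-1) 0 else 0
      let top : Int := if 0 < curseq.length then min (last + a - 1) cap else cap
      (PySem.List.pyRange last (top + 1) 1).map (fun j => curseq ++ [j])) := by
  unfold johnStep
  rw [PySem.List.foldl_append_eq_flatMap]
  simp

theorem johnLoop_nil (a cap : Int) (fuel : Nat) : johnLoop a cap fuel [] = [] := by
  induction fuel with
  | zero => rfl
  | succ n ih =>
    simp only [johnLoop, johnStep, List.foldl_nil, List.headD_nil]
    split <;> simp [ih]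

theorem length_mem_johnStep (a cap : Int) (SEQ : List (List Int)) (n : Nat)
    (h : ∀ s ∈ SEQ, s.length = n) :
    ∀ s ∈ johnStep a cap SEQ, s.length = n + 1 := by
  intro s hs
  rw [johnStep_eq_flatMap] at hs
  simp only [List.mem_flatMap, List.mem_map] at hs
  obtain ⟨c, hc, j, _, rfl⟩ := hs
  simp [h c hc]

theorem johnLoop_eq_flatMap_extJ (a cap : Int) (fuel : Nat) :
    ∀ SEQ : List (List Int), (∀ s ∈ SEQ, (s.length : Int) = (a - 1) - fuel) →
    johnLoop a cap fuel SEQ = SEQ.flatMap (extJ a cap fuel) := by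
  induction fuel with
  | zero =>
    intro SEQ _
    simp [johnLoop, extJ, List.flatMap_singleton']
  | succ n ih =>
    intro SEQ hlen
    cases SEQ with
    | nil => simp [johnLoop_nil]
    | cons s0 rest =>
      have h0 : (s0.length : Int) = (a - 1) - (n + 1) := hlen s0 (by simp)
      have hcond : ((((s0 :: rest).headD []).length : Int) < a - 1) := by
        simp only [List.headD_cons]; omega
      simp only [johnLoop, if_pos hcond]
      rw [ih (johnStep a cap (s0 :: rest)) ?_]
      · rw [johnStep_eq_flatMap, List.flatMap_assoc]
        congr 1
        funext curseq
        simp only [extJ, List.flatMap_map]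
      · intro s hs
        have hn : ∀ t ∈ (s0 :: rest), t.length = ((a - 1) - (n + 1)).toNat := by
          intro t ht; have := hlen t ht; omega
        have := length_mem_johnStep a cap (s0 :: rest) _ hn s hs
        omega

-- the last element of curseq ++ [x] is x, so extJ on a nonempty prefix is sufJ mapped over it
theorem extJ_eq_map_sufJ (a cap : Int) (k : Nat) :
    ∀ (s : List Int) (x : Int),
      extJ a cap k (s ++ [x]) = (sufJ a cap k x).map (fun t => (s ++ [x]) ++ t) := by
  induction k with
  | zero => intro s x; simp [extJ, sufJ]
  | succ n ih =>
    intro s x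
    have hne : 0 < (s ++ [x]).length := by simp
    simp only [extJ, sufJ, if_pos hne, PySem.List.pyGetD_neg_one_append_singleton]
    rw [List.map_flatMap]
    refine List.flatMap_congr ?_
    intro j _
    rw [ih (s ++ [x]) j, List.map_map]
    refine List.map_congr_left ?_
    intro t _
    simp

-- one suffix-DP step on the table of sufJ m is the table of sufJ (m+1)
theorem johnTailsStep_sufJ (a cap : Int) (m : Nat) :
    johnTailsStep a cap ((PySem.List.pyRange 0 (cap + 1) 1).map (fun last => sufJ a cap m last))
      = (PySem.List.pyRange 0 (cap + 1) 1).map (fun last => sufJ a cap (m + 1) last) := by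
  unfold johnTailsStep
  refine List.map_congr_left ?_
  intro last hlast
  rw [PySem.List.mem_pyRange_one] at hlast
  simp only [sufJ]
  refine List.flatMap_congr ?_
  intro j hj
  rw [PySem.List.mem_pyRange_one] at hj
  rw [PySem.List.pyGetD_map_pyRange_of_nonneg _ _ _ _ (by omega) (by omega)]

theorem tails_foldl (a cap : Int) (m : Nat) :
    (List.range m).foldl (fun tails _ => johnTailsStep a cap tails)
        ((PySem.List.pyRange 0 (cap + 1) 1).map (fun _ => [([] : List Int)]))
      = (PySem.List.pyRange 0 (cap + 1) 1).map (fun last => sufJ a cap m last) := by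
  induction m with
  | zero => simp [sufJ]
  | succ n ih => rw [List.range_succ, List.foldl_append, ih, List.foldl_cons, List.foldl_nil,
      johnTailsStep_sufJ]

-- ===== VERDICT (by name: the statement is the Claim_ definition above) =====
theorem john_spec : Claim_equal_john := by
  intro a cap _ _
  unfold Spec_john john john_alt
  by_cases hle : a - 1 ≤ 0
  · have : (a - 1).toNat = 0 := by omega
    rw [this, if_pos hle]; rfl
  · rw [if_neg hle]
    have hk : (a - 1).toNat = (a - 1 - 1).toNat + 1 := by omega
    rw [johnLoop_eq_flatMap_extJ a cap _ [[]] (by intro s hs; simp at hs; subst hs; simp; omega)]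
    simp only [tails_foldl, hk]
    simp only [List.flatMap_cons, List.flatMap_nil, List.append_nil, extJ, List.length_nil,
      lt_self_iff_false, if_false]
    refine List.flatMap_congr ?_
    intro j hj
    rw [PySem.List.mem_pyRange_one] at hj
    rw [PySem.List.pyGetD_map_pyRange_of_nonneg _ _ _ _ (by omega) (by omega)]
    rw [show ([] : List Int) ++ [j] = [] ++ [j] from rfl, extJ_eq_map_sufJ]
    simp
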